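-- pv_equiv track=rewrite | github.com/AidanNowa/EC551_Lab1 | program1.py | estimate_transistors_pos
-- ===== SOURCE A (Python) =====
-- def estimate_transistors_pos(expression):
--     # Remove spaces for consistent parsing
--     expression = expression.replace(" ", "")
--
--     # Initialize counts
--     num_inverters = 0
--     num_and_gates = 0
--     num_or_gates = 0
--
--     # Find all instances of ~{variable}
--     if(expression.find('~A') >= 0):
--         num_inverters += 1
--     if(expression.find('~B') >= 0):
--         num_inverters += 1
--     if(expression.find('~C') >= 0):
--         num_inverters += 1
--     if(expression.find('~D') >= 0):
--         num_inverters += 1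
--
--     # Split the expression into terms based on the '|' symbol
--     or_terms = expression.split('&')
--     num_or_gates = len(or_terms)
--
--     for term in or_terms:
--         # Count the number of '&' symbols in each term to determine the number of AND gates
--         num_and_gates += term.count('|') + 1 # Add 1 because each term starts with an implicit AND
--
--     total_transistors = (num_inverters * 2) + (2 * num_and_gates) + (2 * num_or_gates)
--
--     return num_inverters, num_and_gates, num_or_gates, total_transistors
-- ===== SOURCE B (Python) =====
-- def estimate_transistors_pos(expression):
--     # One left-to-right scan with an accumulator: spaces are skipped, the
--     # previous significant character is tracked to spot negated variables,
--     # and gate counts fall out of the separator tallies.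
--     negated = set()
--     and_seps = 0
--     or_literals = 0
--     prev = ""
--     for ch in expression:
--         if ch == " ":
--             continue
--         if ch == "&":
--             and_seps += 1
--         elif ch == "|":
--             or_literals += 1
--         elif prev == "~" and ch in "ABCD":
--             negated.add(ch)
--         prev = ch
--     num_inverters = len(negated)
--     num_or_gates = and_seps + 1
--     num_and_gates = or_literals + num_or_gates
--     total_transistors = 2 * (num_inverters + num_and_gates + num_or_gates)
--     return num_inverters, num_and_gates, num_or_gates, total_transistors
-- ===== Notes on version B (the rewrite author's own statement) =====
-- stated objective: alternative
-- what changed: Replaces A's staged passes (space-stripping replace, four substring find calls, a split on the AND separator plus a per-term counting loop) with one left-to-right scan of the raw string: a small state machine that skips spaces, tracks the previous significant character to collect negated variables into a set, and tallies the two separator characters, from which the gate counts follow.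
import Mathlib
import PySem

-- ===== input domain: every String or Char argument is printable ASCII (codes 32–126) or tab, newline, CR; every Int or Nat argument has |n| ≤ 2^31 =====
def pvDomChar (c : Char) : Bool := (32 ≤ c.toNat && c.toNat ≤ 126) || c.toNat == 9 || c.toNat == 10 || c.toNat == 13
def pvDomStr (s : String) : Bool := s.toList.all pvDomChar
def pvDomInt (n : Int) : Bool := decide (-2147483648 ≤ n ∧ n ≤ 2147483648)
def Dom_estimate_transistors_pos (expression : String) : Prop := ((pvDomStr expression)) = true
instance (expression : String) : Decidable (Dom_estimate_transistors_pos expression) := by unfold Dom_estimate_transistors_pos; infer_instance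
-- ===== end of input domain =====

-- B replaces A's replace/find/split staged passes with a single left-to-right scan
-- (a small state machine tracking the previous significant character); objective: alternative.

-- ===== PORT A =====
def estimate_transistors_pos (expression : String) : Int × Int × Int × Int :=
  let expression := PySem.Str.replace expression " " ""
  let num_inverters : Int := 0
  let num_and_gates : Int := 0
  let num_inverters := if 0 ≤ PySem.Str.find expression "~A" then num_inverters + 1 else num_inverters
  let num_inverters := if 0 ≤ PySem.Str.find expression "~B" then num_inverters + 1 else num_inverters
  let num_inverters := if 0 ≤ PySem.Str.find expression "~C" then num_inverters + 1 else num_inverters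
  let num_inverters := if 0 ≤ PySem.Str.find expression "~D" then num_inverters + 1 else num_inverters
  -- expression.split('&'): separator nonempty, so exact at the Chars level (PySem.Chars.splitOn)
  let or_terms : List (List Char) := PySem.Chars.splitOn expression.toList ['&']
  let num_or_gates : Int := or_terms.length
  let num_and_gates := or_terms.foldl
    (fun acc term => acc + ((PySem.Chars.count term ['|'] : Int) + 1)) num_and_gates
  let total_transistors := num_inverters * 2 + 2 * num_and_gates + 2 * num_or_gates
  (num_inverters, num_and_gates, num_or_gates, total_transistors)

-- ===== PORT B =====
-- loop body of Source B's single scan: state = (negated set, '&' tally, '|' tally, prev char as a string)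
def pvStep (s : PySem.Set Char × Int × Int × List Char) (ch : Char) :
    PySem.Set Char × Int × Int × List Char :=
  let (negated, and_seps, or_literals, prev) := s
  if ch = ' ' then s
  else if ch = '&' then (negated, and_seps + 1, or_literals, [ch])
  else if ch = '|' then (negated, and_seps, or_literals + 1, [ch])
  else if prev = ['~'] ∧ ch ∈ (['A', 'B', 'C', 'D'] : List Char) then
    (PySem.Set.add negated ch, and_seps, or_literals, [ch])
  else (negated, and_seps, or_literals, [ch])

def estimate_transistors_pos_alt (expression : String) : Int × Int × Int × Int :=
  let r := expression.toList.foldl pvStep (PySem.Set.empty, 0, 0, [])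
  let num_inverters : Int := PySem.Set.len r.1
  let num_or_gates : Int := r.2.1 + 1
  let num_and_gates : Int := r.2.2.1 + num_or_gates
  let total_transistors := 2 * (num_inverters + num_and_gates + num_or_gates)
  (num_inverters, num_and_gates, num_or_gates, total_transistors)

-- ===== PRECONDITION & SPEC =====
def Spec_estimate_transistors_pos (expression : String) (out : Int × Int × Int × Int) : Prop := out = estimate_transistors_pos_alt expression
instance (expression : String) (out : Int × Int × Int × Int) : Decidable (Spec_estimate_transistors_pos expression out) := by unfold Spec_estimate_transistors_pos; infer_instance

-- ===== CLAIM (what is proved, stated in full; the proofs are below) =====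
def Claim_equal_estimate_transistors_pos : Prop := ∀ (expression : String), Dom_estimate_transistors_pos expression → Spec_estimate_transistors_pos expression (estimate_transistors_pos expression)

-- ===== LEMMAS AND PROOFS =====

-- A side: replace(" ", "") is filtering out spaces
theorem pv_replace_go (fuel : Nat) :
    ∀ (l acc : List Char), l.length ≤ fuel →
      PySem.Chars.replace.go [' '] [] fuel l acc
        = acc.reverse ++ l.filter (fun c => c != ' ') := by
  induction fuel with
  | zero =>
    intro l acc h
    have : l = [] := List.eq_nil_of_length_eq_zero (Nat.le_zero.mp h)
    subst this; simp [PySem.Chars.replace.go]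
  | succ n ih =>
    intro l acc h
    cases l with
    | nil => simp [PySem.Chars.replace.go]
    | cons x t =>
      have ht : t.length ≤ n := by simpa using h
      simp only [PySem.Chars.replace.go]
      by_cases hx : x = ' '
      · subst hx
        simp [List.isPrefixOf, ih _ _ ht]
      · simp [List.isPrefixOf, hx, Ne.symm hx, ih _ _ ht]

theorem pv_replace (s : String) :
    (PySem.Str.replace s " " "").toList = s.toList.filter (fun c => c != ' ') := by
  rw [PySem.Str.toList_replace]
  show PySem.Chars.replace s.toList [' '] [] = _
  simp only [PySem.Chars.replace, List.isEmpty_cons]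
  exact pv_replace_go s.toList.length s.toList [] le_rfl

-- the pieces of a single-character split, as a plain structural recursion
def pvParts (c : Char) : List Char → List Char → List (List Char)
  | [], cur => [cur.reverse]
  | x :: rest, cur => if x = c then cur.reverse :: pvParts c rest [] else pvParts c rest (x :: cur)

theorem pv_count_go_single (d : Char) :
    ∀ (fuel : Nat) (l : List Char) (acc : Nat), l.length ≤ fuel →
      PySem.Chars.count.go [d] fuel l acc = acc + l.count d := by
  intro fuel
  induction fuel with
  | zero =>
    intro l acc h
    have : l = [] := List.eq_nil_of_length_eq_zero (Nat.le_zero.mp h)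
    subst this; simp [PySem.Chars.count.go]
  | succ n ih =>
    intro l acc h
    cases l with
    | nil => simp [PySem.Chars.count.go]
    | cons x t =>
      simp only [PySem.Chars.count.go]
      have ht : t.length ≤ n := by simpa using h
      by_cases hx : d = x
      · subst hx
        simp [List.isPrefixOf, ih _ _ ht]
        omega
      · simp [List.isPrefixOf, hx, ih _ _ ht, Ne.symm hx]

theorem pv_count_single (d : Char) (s : List Char) :
    PySem.Chars.count s [d] = s.count d := by
  simp [PySem.Chars.count, pv_count_go_single d s.length s 0 le_rfl]

theorem pv_splitOn_go (c : Char) :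
    ∀ (fuel : Nat) (l cur : List Char) (acc : List (List Char)), l.length ≤ fuel →
      PySem.Chars.splitOn.go [c] fuel l cur acc = acc.reverse ++ pvParts c l cur := by
  intro fuel
  induction fuel with
  | zero =>
    intro l cur acc h
    have : l = [] := List.eq_nil_of_length_eq_zero (Nat.le_zero.mp h)
    subst this; simp [PySem.Chars.splitOn.go, pvParts]
  | succ n ih =>
    intro l cur acc h
    cases l with
    | nil => simp [PySem.Chars.splitOn.go, pvParts]
    | cons x t =>
      simp only [PySem.Chars.splitOn.go]
      have ht : t.length ≤ n := by simpa using h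
      by_cases hx : c = x
      · subst hx
        simp [List.isPrefixOf, ih _ _ _ ht, pvParts]
      · simp [List.isPrefixOf, hx, ih _ _ _ ht, pvParts, Ne.symm hx]

theorem pv_splitOn_single (c : Char) (s : List Char) :
    PySem.Chars.splitOn s [c] = pvParts c s [] := by
  simp [PySem.Chars.splitOn, pv_splitOn_go c (s.length + 1) s [] [] (by omega)]

theorem pv_parts_length (c : Char) :
    ∀ (l cur : List Char), (pvParts c l cur).length = l.count c + 1 := by
  intro l
  induction l with
  | nil => intro cur; simp [pvParts]
  | cons x t ih =>
    intro cur
    by_cases hx : x = c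
    · subst hx; simp [pvParts, ih]
    · simp [pvParts, hx, ih]

theorem pv_parts_foldl (c : Char) (hc : c ≠ '|') :
    ∀ (l cur : List Char) (a : Int),
      (pvParts c l cur).foldl (fun acc term => acc + ((PySem.Chars.count term ['|'] : Int) + 1)) a
        = a + ((cur.count '|' : Int)) + ((l.count '|' : Int)) + ((l.count c : Int)) + 1 := by
  intro l
  induction l with
  | nil =>
    intro cur a
    simp [pvParts, pv_count_single]
    ring
  | cons x t ih =>
    intro cur a
    by_cases hx : x = c
    · subst hx
      rw [pvParts, if_pos rfl, List.foldl_cons, ih]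
      simp [pv_count_single, List.count_cons, hc, Ne.symm hc]
      push_cast
      ring
    · rw [pvParts, if_neg hx, ih]
      by_cases hd : x = '|'
      · subst hd
        simp [hx]
        try push_cast
        try ring
      · simp [hx, hd]
        try push_cast
        try ring

-- B side: scanning the original string is the same as scanning with the spaces gone
theorem pv_step_filter :
    ∀ (l : List Char) (s : PySem.Set Char × Int × Int × List Char),
      l.foldl pvStep s = (l.filter (fun c => c != ' ')).foldl pvStep s := by
  intro l
  induction l with
  | nil => intro s; rfl
  | cons x t ih =>
    intro s
    by_cases hx : x = ' '
    · subst hx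
      simp [pvStep, ih]
    · simp [List.filter_cons, hx, ih]

-- '~v' occurs in prev ++ l  ↔  it starts right at the junction or occurs in l (prev a single char)
theorem pv_infix_shift (x c : Char) (rest : List Char) :
    ∀ (prev : List Char), prev.length ≤ 1 →
      (['~', x] <:+: prev ++ c :: rest ↔ (prev = ['~'] ∧ c = x) ∨ ['~', x] <:+: c :: rest) := by
  intro prev hprev
  match prev, hprev with
  | [], _ => simp
  | [p], _ =>
    constructor
    · intro h
      rcases List.infix_cons_iff.mp h with hpre | hinf
      · simp only [List.append_eq, List.cons_append, List.nil_append,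
          List.cons_prefix_cons] at hpre
        exact Or.inl ⟨by simp [hpre.1.symm], hpre.2.1.symm⟩
      · exact Or.inr hinf
    · rintro (⟨hp, hc⟩ | hinf)
      · rw [hp, hc]
        exact ⟨[], rest, rfl⟩
      · exact hinf.trans (List.infix_cons_iff.mpr (Or.inr (List.infix_refl _)))

-- the single-scan invariant: separator tallies are counts, the set holds exactly the negated variables
theorem pv_mach :
    ∀ (l : List Char), (∀ c ∈ l, c ≠ ' ') →
    ∀ (neg : PySem.Set Char) (a o : Int) (prev : List Char), prev.length ≤ 1 →
      (l.foldl pvStep (neg, a, o, prev)).2.1 = a + (l.count '&' : Int) ∧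
      (l.foldl pvStep (neg, a, o, prev)).2.2.1 = o + (l.count '|' : Int) ∧
      (∀ x, x ∈ (l.foldl pvStep (neg, a, o, prev)).1 ↔
        x ∈ neg ∨ (x ∈ (['A', 'B', 'C', 'D'] : List Char) ∧ ['~', x] <:+: prev ++ l)) := by
  intro l
  induction l with
  | nil =>
    intro _ neg a o prev hprev
    refine ⟨by simp, by simp, fun x => ?_⟩
    simp only [List.foldl_nil, List.append_nil]
    constructor
    · exact fun h => Or.inl h
    · rintro (h | ⟨_, hinf⟩)
      · exact h
      · exact absurd hinf.length_le (by simp; omega)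
  | cons c rest ih =>
    intro hsp neg a o prev hprev
    have hc : c ≠ ' ' := hsp c (List.mem_cons_self)
    have hrest : ∀ d ∈ rest, d ≠ ' ' := fun d hd => hsp d (List.mem_cons_of_mem _ hd)
    rw [List.foldl_cons]
    by_cases hand : c = '&'
    · subst hand
      rw [show pvStep (neg, a, o, prev) '&' = (neg, a + 1, o, ['&']) from by simp [pvStep]]
      obtain ⟨h1, h2, h3⟩ := ih hrest neg (a + 1) o ['&'] (by simp)
      refine ⟨by rw [h1]; simp [List.count_cons]; push_cast; ring,
              by rw [h2]; simp [List.count_cons], fun x => ?_⟩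
      rw [h3 x, pv_infix_shift x '&' rest prev hprev]
      constructor
      · rintro (h | ⟨hx, hinf⟩)
        · exact Or.inl h
        · exact Or.inr ⟨hx, Or.inr hinf⟩
      · rintro (h | ⟨hx, (⟨_, hcx⟩ | hinf)⟩)
        · exact Or.inl h
        · rw [← hcx] at hx; simp at hx
        · exact Or.inr ⟨hx, hinf⟩
    · by_cases hor : c = '|'
      · subst hor
        rw [show pvStep (neg, a, o, prev) '|' = (neg, a, o + 1, ['|']) from by simp [pvStep]]
        obtain ⟨h1, h2, h3⟩ := ih hrest neg a (o + 1) ['|'] (by simp)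
        refine ⟨by rw [h1]; simp [List.count_cons],
                by rw [h2]; simp [List.count_cons]; push_cast; ring, fun x => ?_⟩
        rw [h3 x, pv_infix_shift x '|' rest prev hprev]
        constructor
        · rintro (h | ⟨hx, hinf⟩)
          · exact Or.inl h
          · exact Or.inr ⟨hx, Or.inr hinf⟩
        · rintro (h | ⟨hx, (⟨_, hcx⟩ | hinf)⟩)
          · exact Or.inl h
          · rw [← hcx] at hx; simp at hx
          · exact Or.inr ⟨hx, hinf⟩
      · by_cases hneg : prev = ['~'] ∧ c ∈ (['A', 'B', 'C', 'D'] : List Char)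
        · rw [show pvStep (neg, a, o, prev) c = (PySem.Set.add neg c, a, o, [c]) from by
            simp [pvStep, hc, hand, hor, hneg]]
          obtain ⟨h1, h2, h3⟩ := ih hrest (PySem.Set.add neg c) a o [c] (by simp)
          refine ⟨by rw [h1]; simp [List.count_cons, hand],
                  by rw [h2]; simp [List.count_cons, hor], fun x => ?_⟩
          rw [h3 x, pv_infix_shift x c rest prev hprev, PySem.Set.mem_add]
          constructor
          · rintro ((h | hxc) | ⟨hx, hinf⟩)
            · exact Or.inl h
            · subst hxc; exact Or.inr ⟨hneg.2, Or.inl ⟨hneg.1, rfl⟩⟩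
            · exact Or.inr ⟨hx, Or.inr hinf⟩
          · rintro (h | ⟨hx, (⟨_, hcx⟩ | hinf)⟩)
            · exact Or.inl (Or.inl h)
            · exact Or.inl (Or.inr hcx.symm)
            · exact Or.inr ⟨hx, hinf⟩
        · rw [show pvStep (neg, a, o, prev) c = (neg, a, o, [c]) from by
            simp only [pvStep]; rw [if_neg hc, if_neg hand, if_neg hor, if_neg hneg]]
          obtain ⟨h1, h2, h3⟩ := ih hrest neg a o [c] (by simp)
          refine ⟨by rw [h1]; simp [List.count_cons, hand],
                  by rw [h2]; simp [List.count_cons, hor], fun x => ?_⟩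
          rw [h3 x, pv_infix_shift x c rest prev hprev]
          constructor
          · rintro (h | ⟨hx, hinf⟩)
            · exact Or.inl h
            · exact Or.inr ⟨hx, Or.inr hinf⟩
          · rintro (h | ⟨hx, (⟨hp, hcx⟩ | hinf)⟩)
            · exact Or.inl h
            · exact absurd ⟨hp, hcx ▸ hx⟩ hneg
            · exact Or.inr ⟨hx, hinf⟩

theorem pv_mach_nodup :
    ∀ (l : List Char) (s : PySem.Set Char × Int × Int × List Char),
      s.1.Nodup → (l.foldl pvStep s).1.Nodup := by
  intro l
  induction l with
  | nil => intro s h; exact h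
  | cons c rest ih =>
    intro s h
    rw [List.foldl_cons]
    apply ih
    obtain ⟨neg, a, o, prev⟩ := s
    simp only [pvStep]
    split_ifs <;> first | exact h | exact PySem.Set.nodup_add _ _ h

-- ===== VERDICT (by name: the statement is the Claim_ definition above) =====
theorem estimate_transistors_pos_spec : Claim_equal_estimate_transistors_pos := by
  intro expression _
  unfold Spec_estimate_transistors_pos estimate_transistors_pos estimate_transistors_pos_alt
  dsimp only
  set f := expression.toList.filter (fun c => c != ' ') with hf
  have hnospace : ∀ c ∈ f, c ≠ ' ' := by
    intro c hcf
    have := List.of_mem_filter hcf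
    simpa using this
  have hlist : (PySem.Str.replace expression " " "").toList = f := pv_replace expression
  -- A's find tests, as infix facts about f
  have eA : (0 ≤ PySem.Str.find (PySem.Str.replace expression " " "") "~A") = (['~', 'A'] <:+: f) :=
    propext (by rw [PySem.Str.find_nonneg_iff, hlist,
      show ("~A" : String).toList = ['~', 'A'] from by decide])
  have eB : (0 ≤ PySem.Str.find (PySem.Str.replace expression " " "") "~B") = (['~', 'B'] <:+: f) :=
    propext (by rw [PySem.Str.find_nonneg_iff, hlist,
      show ("~B" : String).toList = ['~', 'B'] from by decide])
  have eC : (0 ≤ PySem.Str.find (PySem.Str.replace expression " " "") "~C") = (['~', 'C'] <:+: f) :=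
    propext (by rw [PySem.Str.find_nonneg_iff, hlist,
      show ("~C" : String).toList = ['~', 'C'] from by decide])
  have eD : (0 ≤ PySem.Str.find (PySem.Str.replace expression " " "") "~D") = (['~', 'D'] <:+: f) :=
    propext (by rw [PySem.Str.find_nonneg_iff, hlist,
      show ("~D" : String).toList = ['~', 'D'] from by decide])
  -- B's machine, run over the filtered list
  rw [pv_step_filter expression.toList, ← hf]
  obtain ⟨h1, h2, h3⟩ := pv_mach f hnospace PySem.Set.empty 0 0 [] (by simp)
  set r := f.foldl pvStep (PySem.Set.empty, 0, 0, []) with hr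
  have hmem : ∀ x, x ∈ r.1 ↔ x ∈ (['A', 'B', 'C', 'D'] : List Char) ∧ ['~', x] <:+: f := by
    intro x
    rw [h3 x]
    simp [PySem.Set.empty]
  -- the set's size is the number of variable letters that occur negated
  have hnodup : r.1.Nodup := pv_mach_nodup f _ (by simp [PySem.Set.empty])
  have hperm : r.1.Perm ((['A', 'B', 'C', 'D'] : List Char).filter
      (fun v => decide (['~', v] <:+: f))) := by
    rw [List.perm_ext_iff_of_nodup hnodup (List.Nodup.filter _ (by decide))]
    intro x
    rw [hmem x, List.mem_filter]
    simp
  have hlen : PySem.Set.len r.1 = (((['A', 'B', 'C', 'D'] : List Char).filter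
      (fun v => decide (['~', v] <:+: f))).length : Int) := by
    simp [PySem.Set.len, hperm.length_eq]
  -- A's or/and tallies via the split characterization
  have hsplit : PySem.Chars.splitOn (PySem.Str.replace expression " " "").toList ['&'] = pvParts '&' f [] := by
    rw [hlist, pv_splitOn_single]
  have hO : ((PySem.Chars.splitOn (PySem.Str.replace expression " " "").toList ['&']).length : Int)
      = (f.count '&' : Int) + 1 := by
    rw [hsplit, pv_parts_length]; push_cast; ring
  have hA : (PySem.Chars.splitOn (PySem.Str.replace expression " " "").toList ['&']).foldl
        (fun acc term => acc + ((PySem.Chars.count term ['|'] : Int) + 1)) (0 : Int)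
      = (f.count '|' : Int) + (f.count '&' : Int) + 1 := by
    rw [hsplit, pv_parts_foldl '&' (by decide)]
    simp
  -- assemble the four components
  have hB1 : r.2.1 = (f.count '&' : Int) := by rw [h1]; ring
  have hB2 : r.2.2.1 = (f.count '|' : Int) := by rw [h2]; ring
  have hInv : (if 0 ≤ PySem.Str.find (PySem.Str.replace expression " " "") "~D" then
        (if 0 ≤ PySem.Str.find (PySem.Str.replace expression " " "") "~C" then
          (if 0 ≤ PySem.Str.find (PySem.Str.replace expression " " "") "~B" then
            (if 0 ≤ PySem.Str.find (PySem.Str.replace expression " " "") "~A" then (0 : Int) + 1 else 0) + 1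
          else (if 0 ≤ PySem.Str.find (PySem.Str.replace expression " " "") "~A" then (0 : Int) + 1 else 0)) + 1
        else (if 0 ≤ PySem.Str.find (PySem.Str.replace expression " " "") "~B" then
            (if 0 ≤ PySem.Str.find (PySem.Str.replace expression " " "") "~A" then (0 : Int) + 1 else 0) + 1
          else (if 0 ≤ PySem.Str.find (PySem.Str.replace expression " " "") "~A" then (0 : Int) + 1 else 0))) + 1
      else (if 0 ≤ PySem.Str.find (PySem.Str.replace expression " " "") "~C" then
          (if 0 ≤ PySem.Str.find (PySem.Str.replace expression " " "") "~B" then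
            (if 0 ≤ PySem.Str.find (PySem.Str.replace expression " " "") "~A" then (0 : Int) + 1 else 0) + 1
          else (if 0 ≤ PySem.Str.find (PySem.Str.replace expression " " "") "~A" then (0 : Int) + 1 else 0)) + 1
        else (if 0 ≤ PySem.Str.find (PySem.Str.replace expression " " "") "~B" then
            (if 0 ≤ PySem.Str.find (PySem.Str.replace expression " " "") "~A" then (0 : Int) + 1 else 0) + 1
          else (if 0 ≤ PySem.Str.find (PySem.Str.replace expression " " "") "~A" then (0 : Int) + 1 else 0))))
      = PySem.Set.len r.1 := by
    rw [hlen]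
    simp only [eA, eB, eC, eD]
    by_cases pA : ['~', 'A'] <:+: f <;> by_cases pB : ['~', 'B'] <:+: f <;>
      by_cases pC : ['~', 'C'] <:+: f <;> by_cases pD : ['~', 'D'] <:+: f <;>
      simp [pA, pB, pC, pD, List.filter]
  simp only [Prod.mk.injEq]
  refine ⟨hInv, ?_, ?_, ?_⟩
  · rw [hA, hB2, hB1]; ring
  · rw [hO, hB1]
  · rw [hInv, hA, hO, hB1, hB2, hlen]; ring
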